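-- pv_equiv track=rewrite | github.com/EduardoZarza01/IngSoft | drink_module_with_tests.py | validate_drink_input
-- ===== SOURCE A (Python) =====
-- def validate_drink_input(input_string):
--     """
--     Valida el ingreso de una nueva bebida según las especificaciones dadas.
--     """
--     parts = ''.join(input_string.split()).split(',')
--
--     if not parts[0].isalpha() or not (2 <= len(parts[0]) <= 15):
--         return False
--
--     if len(parts) < 2 or len(parts) > 6:
--         return False
--
--     try:
--         sizes = list(map(int, parts[1:]))
--         if not all(1 <= size <= 48 for size in sizes):
--             return False
--         if sorted(sizes) != sizes:
--             return False
--     except ValueError: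
--         return False
--
--     return True
-- ===== SOURCE B (Python) =====
-- def validate_drink_input(input_string):
--     # Single fused pass over the size fields: parse, range-check and
--     # non-decreasing check (via a `prev` accumulator) in one loop, no sort.
--     parts = ''.join(input_string.split()).split(',')
--     name = parts[0]
--     if not name.isalpha() or not (2 <= len(name) <= 15):
--         return False
--     if not (2 <= len(parts) <= 6):
--         return False
--     prev = 0
--     for part in parts[1:]:
--         try:
--             size = int(part)
--         except ValueError:
--             return False
--         if not (1 <= size <= 48) or size < prev:
--             return False
--         prev = size
--     return True
-- ===== Notes on version B (the rewrite author's own statement) =====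
-- stated objective: alternative
-- what changed: Replaces A's three separate passes over the size fields (map-to-int inside try, all-in-range, sorted(sizes)==sizes) with a single fused loop that parses each field, range-checks it and compares it to the previous one via a prev accumulator, removing the sort.
import Mathlib
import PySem

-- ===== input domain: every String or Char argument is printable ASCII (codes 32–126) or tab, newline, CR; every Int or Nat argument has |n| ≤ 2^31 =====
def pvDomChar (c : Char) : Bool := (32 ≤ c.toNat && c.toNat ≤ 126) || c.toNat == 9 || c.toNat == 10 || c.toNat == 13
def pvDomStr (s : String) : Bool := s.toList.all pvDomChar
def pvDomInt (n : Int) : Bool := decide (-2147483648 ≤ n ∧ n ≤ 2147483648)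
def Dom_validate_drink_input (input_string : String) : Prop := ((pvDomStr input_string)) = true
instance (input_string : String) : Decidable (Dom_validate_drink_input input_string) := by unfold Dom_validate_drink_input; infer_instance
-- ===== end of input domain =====

-- B fuses A's three passes over the size fields (int parsing, range check, sorted==self) into one loop with a `prev` accumulator, removing the sort; same return value.


-- ===== PORT A =====
-- list(map(int, parts)) inside `try: ... except ValueError`: none = some int() raised
def pvMapInt? : List String → Option (List Int)
  | [] => some []
  | p :: ps =>
    match PySem.Int.ofStr? p with
    | none => none
    | some z =>
      match pvMapInt? ps with
      | none => none
      | some zs => some (z :: zs)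

def validate_drink_input (input_string : String) : Bool :=
  let parts := (PySem.Str.split? (PySem.Str.join "" (PySem.Str.split₀ input_string)) ",").getD []
  let p0 := PySem.List.pyGetD parts 0 ""   -- parts[0]; split always yields a nonempty list
  if !(PySem.Str.strIsalpha p0) || !(2 ≤ PySem.Str.len p0 ∧ PySem.Str.len p0 ≤ 15) then false
  else if parts.length < 2 || parts.length > 6 then false
  else
    match pvMapInt? (PySem.List.slice parts (some 1) none) with
    | none => false   -- ValueError
    | some sizes =>
      if !(sizes.all (fun size => decide (1 ≤ size ∧ size ≤ 48))) then false
      else if PySem.List.sorted sizes (fun x => x) ≠ sizes then false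
      else true

-- ===== PORT B =====
-- fused loop: parse each field, range-check it, and compare with the previous one
def pvCheckSizes : Int → List String → Bool
  | _, [] => true
  | prev, p :: ps =>
    match PySem.Int.ofStr? p with
    | none => false   -- ValueError
    | some size =>
      if !(1 ≤ size ∧ size ≤ 48) || size < prev then false
      else pvCheckSizes size ps

def validate_drink_input_alt (input_string : String) : Bool :=
  let parts := (PySem.Str.split? (PySem.Str.join "" (PySem.Str.split₀ input_string)) ",").getD []
  let name := PySem.List.pyGetD parts 0 ""   -- parts[0]; split always yields a nonempty list
  if !(PySem.Str.strIsalpha name) || !(2 ≤ PySem.Str.len name ∧ PySem.Str.len name ≤ 15) then false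
  else if !(2 ≤ parts.length ∧ parts.length ≤ 6) then false
  else pvCheckSizes 0 (parts.drop 1)

-- ===== PRECONDITION & SPEC =====
def Spec_validate_drink_input (input_string : String) (out : Bool) : Prop := out = validate_drink_input_alt input_string
instance (input_string : String) (out : Bool) : Decidable (Spec_validate_drink_input input_string out) := by unfold Spec_validate_drink_input; infer_instance

-- ===== CLAIM (what is proved, stated in full; the proofs are below) =====
def Claim_equal_validate_drink_input : Prop := ∀ (input_string : String), Dom_validate_drink_input input_string → Spec_validate_drink_input input_string (validate_drink_input input_string)

-- ===== LEMMAS AND PROOFS =====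

-- B's fused loop, characterised: it accepts iff every field parses, every size is in
-- range, and prev :: sizes is non-decreasing.
theorem pvCheckSizes_iff (ps : List String) (prev : Int) :
    pvCheckSizes prev ps = true ↔
      ∃ sizes, pvMapInt? ps = some sizes ∧ (∀ z ∈ sizes, 1 ≤ z ∧ z ≤ 48) ∧
        List.IsChain (· ≤ ·) (prev :: sizes) := by
  induction ps generalizing prev with
  | nil => simp [pvCheckSizes, pvMapInt?]
  | cons p ps ih =>
    cases hz : PySem.Int.ofStr? p with
    | none => simp [pvCheckSizes, pvMapInt?, hz]
    | some z =>
      by_cases hbad : ¬(1 ≤ z ∧ z ≤ 48) ∨ z < prev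
      · simp only [pvCheckSizes, pvMapInt?, hz]
        have hc : (!(1 ≤ z ∧ z ≤ 48) || decide (z < prev)) = true := by
          rcases hbad with h | h <;> simp [h]
        rw [if_pos hc]
        constructor
        · intro h; exact absurd h (by simp)
        · rintro ⟨sizes, hsz, hall, hch⟩
          exfalso
          cases hmap : pvMapInt? ps with
          | none => rw [hmap] at hsz; exact absurd hsz (by simp)
          | some zs =>
            rw [hmap] at hsz
            simp only [Option.some.injEq] at hsz
            subst hsz
            rcases hbad with h | h
            · exact h (hall z (by simp))
            · exact absurd (List.isChain_cons_cons.mp hch).1 (by omega)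
      · rw [not_or, not_not, not_lt] at hbad
        obtain ⟨hrange, hle⟩ := hbad
        have hc : (!(1 ≤ z ∧ z ≤ 48) || decide (z < prev)) = false := by
          simp [hrange.1, hrange.2, not_lt.mpr hle]
        simp only [pvCheckSizes, pvMapInt?, hz, hc, Bool.false_eq_true, if_false]
        rw [ih z]
        constructor
        · rintro ⟨zs, hmap, hall, hch⟩
          refine ⟨z :: zs, by rw [hmap], ?_, ?_⟩
          · intro y hy
            rcases List.mem_cons.mp hy with rfl | hy
            · exact hrange
            · exact hall y hy
          · cases zs with
            | nil => simpa [List.isChain_cons_cons] using hle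
            | cons w ws =>
              exact List.isChain_cons_cons.mpr ⟨hle, hch⟩
        · rintro ⟨sizes, hsz, hall, hch⟩
          cases hmap : pvMapInt? ps with
          | none => rw [hmap] at hsz; exact absurd hsz (by simp)
          | some zs =>
            rw [hmap] at hsz
            simp only [Option.some.injEq] at hsz
            subst hsz
            refine ⟨zs, rfl, fun y hy => hall y (by simp [hy]), ?_⟩
            exact (List.isChain_cons_cons.mp hch).2

-- B's loop started at 0 equals A's three-pass tail check.
theorem pvCheckSizes_zero (ps : List String) :
    (match pvMapInt? ps with
     | none => false
     | some sizes =>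
       if !(sizes.all (fun size => decide (1 ≤ size ∧ size ≤ 48))) then false
       else if PySem.List.sorted sizes (fun x => x) ≠ sizes then false
       else true) = pvCheckSizes 0 ps := by
  rw [Bool.eq_iff_iff, pvCheckSizes_iff]
  cases hmap : pvMapInt? ps with
  | none => simp
  | some sizes =>
    simp only [Option.some.injEq]
    constructor
    · intro h
      have hall : sizes.all (fun size => decide (1 ≤ size ∧ size ≤ 48)) = true := by
        cases hA : sizes.all (fun size => decide (1 ≤ size ∧ size ≤ 48)) with
        | false => rw [hA] at h; simp at h
        | true => rfl
      have hsort : PySem.List.sorted sizes (fun x => x) = sizes := by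
        by_contra hc
        rw [if_neg (by simp only [hall]; decide), if_pos hc] at h
        simp at h
      have hall' : ∀ z ∈ sizes, 1 ≤ z ∧ z ≤ 48 := by
        intro z hz; simpa using (List.all_eq_true.mp hall z hz)
      have hpw : sizes.Pairwise (· ≤ ·) := by
        have := PySem.List.sorted_pairwise sizes (fun x => x)
        rwa [hsort] at this
      refine ⟨sizes, rfl, hall', ?_⟩
      cases sizes with
      | nil => simp
      | cons w ws =>
        refine List.isChain_cons_cons.mpr ⟨(hall' w (by simp)).1.trans' (by omega), ?_⟩
        exact List.isChain_iff_pairwise.mpr hpw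
    · rintro ⟨sizes', hsz, hall, hch⟩
      cases hsz
      have hpw : sizes.Pairwise (· ≤ ·) := by
        apply List.isChain_iff_pairwise.mp
        cases sizes with
        | nil => simp
        | cons w ws => exact (List.isChain_cons_cons.mp hch).2
      have hallb : sizes.all (fun size => decide (1 ≤ size ∧ size ≤ 48)) = true :=
        List.all_eq_true.mpr fun z hz => by simp [hall z hz]
      rw [if_neg (by simp only [hallb]; decide),
          if_neg (by simp [PySem.List.sorted_eq_self_of_pairwise sizes (fun x => x) hpw])]

theorem validate_drink_input_spec' (s : String) :
    validate_drink_input s = validate_drink_input_alt s := by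
  simp only [validate_drink_input, validate_drink_input_alt]
  generalize ((PySem.Str.split? (PySem.Str.join "" (PySem.Str.split₀ s)) ",").getD []) = parts
  have hlen : (decide (parts.length < 2) || decide (parts.length > 6))
      = !decide (2 ≤ parts.length ∧ parts.length ≤ 6) := by
    rw [Bool.eq_iff_iff]
    simp only [Bool.or_eq_true, decide_eq_true_eq, Bool.not_eq_true', decide_eq_false_iff_not,
      not_and, not_le]
    omega
  have hslice : PySem.List.slice parts (some 1) none = parts.drop 1 := by
    simp [pysem]
  rw [hlen, hslice]
  split_ifs <;> first | rfl | exact pvCheckSizes_zero (parts.drop 1)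

-- ===== VERDICT (by name: the statement is the Claim_ definition above) =====
theorem validate_drink_input_spec : Claim_equal_validate_drink_input := by
  intro s _
  exact validate_drink_input_spec' s
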